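-- pv_equiv track=rewrite | github.com/shahinvaseghi/seoanalyze | app/web/core_web_vitals.py | _remove_duplicate_actions
-- ===== SOURCE A (Python) =====
-- def _remove_duplicate_actions(all_actions):
--     """Remove duplicate actions and prioritize"""
--     unique_actions = []
--     seen_actions = set()
--
--     # Sort by priority level
--     priority_order = {'immediate': 1, 'medium': 2, 'long_term': 3}
--     sorted_actions = sorted(all_actions, key=lambda x: priority_order.get(x.get('priority_level', 'medium'), 2))
--
--     for action in sorted_actions:
--         action_key = action['action'].lower().strip()
--         if action_key not in seen_actions:
--             seen_actions.add(action_key)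
--             unique_actions.append(action)
--
--     return unique_actions
-- ===== SOURCE B (Python) =====
-- def _remove_duplicate_actions(all_actions):
--     """Remove duplicate actions and prioritize.
--
--     Instead of comparison-sorting the whole list and scanning with a seen-set,
--     build the priority order with three filter passes (the priority value is
--     always 1, 2 or 3) and deduplicate with a first-wins insertion-ordered dict
--     whose values are the answer."""
--     priority_order = {'immediate': 1, 'medium': 2, 'long_term': 3}
--
--     def prio(a):
--         return priority_order.get(a.get('priority_level', 'medium'), 2)
--
--     ordered = ([a for a in all_actions if prio(a) == 1]
--                + [a for a in all_actions if prio(a) == 2]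
--                + [a for a in all_actions if prio(a) == 3])
--
--     best = {}
--     for action in ordered:
--         best.setdefault(action['action'].lower().strip(), action)
--     return list(best.values())
-- ===== Notes on version B (the rewrite author's own statement) =====
-- stated objective: alternative
-- what changed: Replaces A's comparison sort by three linear filter passes over the 1/2/3 priority values and replaces the seen-set + append dedup scan by a first-wins insertion-ordered dict (setdefault) whose values list is the result.
import Mathlib
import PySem

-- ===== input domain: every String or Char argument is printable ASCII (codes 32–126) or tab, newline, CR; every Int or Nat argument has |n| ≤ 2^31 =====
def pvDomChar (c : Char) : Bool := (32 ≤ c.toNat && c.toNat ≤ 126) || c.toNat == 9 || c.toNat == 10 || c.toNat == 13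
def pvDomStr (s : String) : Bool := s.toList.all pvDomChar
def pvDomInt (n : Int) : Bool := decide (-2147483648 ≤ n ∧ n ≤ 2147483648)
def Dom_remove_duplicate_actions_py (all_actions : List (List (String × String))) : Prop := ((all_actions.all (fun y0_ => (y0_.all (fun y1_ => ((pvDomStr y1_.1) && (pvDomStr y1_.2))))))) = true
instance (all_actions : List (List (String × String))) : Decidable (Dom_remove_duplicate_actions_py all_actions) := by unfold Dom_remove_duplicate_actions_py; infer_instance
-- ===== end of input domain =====

-- B replaces A's comparison sort by three filter passes over the priority values 1/2/3
-- and A's seen-set dedup scan by a first-wins insertion-ordered dict whose values are returned.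

-- ===== PORT A =====
-- priority_order.get(action.get('priority_level', 'medium'), 2)  (same expression in A and B)
def pvPrio (a : List (String × String)) : Int :=
  (PySem.Dict.ofList [("immediate", (1 : Int)), ("medium", 2), ("long_term", 3)]).getD
    ((PySem.Dict.mk a).getD "priority_level" "medium") 2

-- action['action'].lower().strip(); the ['action'] access raises KeyError when the key
-- is absent — Pre_ excludes exactly that, so the "" default is never reached under Pre_.
def pvKey (a : List (String × String)) : String :=
  PySem.Str.strip (PySem.Str.lower (((PySem.Dict.mk a).get? "action").getD ""))

def remove_duplicate_actions_py (all_actions : List (List (String × String))) :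
    List (List (String × String)) :=
  let sorted_actions := PySem.List.sorted all_actions pvPrio false
  (sorted_actions.foldl
    (fun (st : List (List (String × String)) × PySem.Set String) action =>
      let k := pvKey action
      if PySem.Set.contains st.2 k then st
      else (st.1 ++ [action], PySem.Set.add st.2 k))
    ([], PySem.Set.empty)).1

-- ===== PORT B =====
def remove_duplicate_actions_py_alt (all_actions : List (List (String × String))) :
    List (List (String × String)) :=
  let ordered :=
    all_actions.filter (fun a => decide (pvPrio a = 1))
      ++ all_actions.filter (fun a => decide (pvPrio a = 2))
      ++ all_actions.filter (fun a => decide (pvPrio a = 3))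
  (ordered.foldl (fun best action => best.setdefault (pvKey action) action)
    PySem.Dict.empty).values

-- ===== PRECONDITION & SPEC =====
-- Pre_ excludes exactly the inputs on which the Python raises KeyError: an action
-- dict without the key 'action' (both A and B raise there).
def Pre_remove_duplicate_actions_py (all_actions : List (List (String × String))) : Prop :=
  (all_actions.all (fun a => (PySem.Dict.mk a).contains "action")) = true
instance (all_actions : List (List (String × String))) : Decidable (Pre_remove_duplicate_actions_py all_actions) := by unfold Pre_remove_duplicate_actions_py; infer_instance

def pvWitness_remove_duplicate_actions_py : (List (List (String × String))) :=
  [[("action", "Fix titles"), ("priority_level", "immediate")], [("action", " fix titles ")]]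

def Spec_remove_duplicate_actions_py (all_actions : List (List (String × String))) (out : List (List (String × String))) : Prop := out = remove_duplicate_actions_py_alt all_actions
instance (all_actions : List (List (String × String))) (out : List (List (String × String))) : Decidable (Spec_remove_duplicate_actions_py all_actions out) := by unfold Spec_remove_duplicate_actions_py; infer_instance

-- ===== CLAIM (what is proved, stated in full; the proofs are below) =====
def Claim_equal_remove_duplicate_actions_py : Prop := ∀ (all_actions : List (List (String × String))), Dom_remove_duplicate_actions_py all_actions → Pre_remove_duplicate_actions_py all_actions → Spec_remove_duplicate_actions_py all_actions (remove_duplicate_actions_py all_actions)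

-- ===== LEMMAS AND PROOFS =====

-- the priority key only ever takes the values 1, 2, 3
theorem pvPrio_cases (a : List (String × String)) :
    pvPrio a = 1 ∨ pvPrio a = 2 ∨ pvPrio a = 3 := by
  unfold pvPrio
  generalize (PySem.Dict.mk a).getD "priority_level" "medium" = s
  have h : PySem.Dict.ofList [("immediate", (1 : Int)), ("medium", 2), ("long_term", 3)]
      = PySem.Dict.mk [("immediate", (1 : Int)), ("medium", 2), ("long_term", 3)] := by decide
  rw [h]
  simp [PySem.Dict.getD_eq_get?_getD, PySem.Dict.get?_mk_cons]
  split_ifs <;> simp [PySem.Dict.get?, Option.getD]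

theorem ins_skip {α : Type} (bef : α → α → Bool) (x : α) (ys zs : List α)
    (h : ∀ y ∈ ys, bef x y = false) :
    PySem.List.insertBy bef x (ys ++ zs) = ys ++ PySem.List.insertBy bef x zs := by
  induction ys with
  | nil => simp
  | cons y t ih =>
    have hy : bef x y = false := h y (by simp)
    simp [PySem.List.insertBy, hy, ih (fun z hz => h z (by simp [hz]))]

theorem ins_front {α : Type} (bef : α → α → Bool) (x : α) (l : List α)
    (h : ∀ y ∈ l, bef x y = true) :
    PySem.List.insertBy bef x l = x :: l := by
  cases l with
  | nil => simp [PySem.List.insertBy]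
  | cons y t => simp [PySem.List.insertBy, h y (by simp)]

-- A's stable insertion sort keeps a 1-bucket ++ 2-bucket ++ 3-bucket shape
theorem part (xs : List (List (String × String))) :
    ∀ (a1 a2 a3 : List (List (String × String))),
    (∀ y ∈ a1, pvPrio y = 1) → (∀ y ∈ a2, pvPrio y = 2) → (∀ y ∈ a3, pvPrio y = 3) →
    xs.foldl (fun acc x => PySem.List.insertBy (fun a b => decide (pvPrio a < pvPrio b)) x acc)
        (a1 ++ (a2 ++ a3))
      = (a1 ++ xs.filter (fun y => decide (pvPrio y = 1)))
        ++ ((a2 ++ xs.filter (fun y => decide (pvPrio y = 2)))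
        ++ (a3 ++ xs.filter (fun y => decide (pvPrio y = 3)))) := by
  induction xs with
  | nil => intro a1 a2 a3 _ _ _; simp
  | cons x t ih =>
    intro a1 a2 a3 h1 h2 h3
    rcases pvPrio_cases x with hx | hx | hx
    · have hstep : PySem.List.insertBy (fun a b => decide (pvPrio a < pvPrio b)) x (a1 ++ (a2 ++ a3))
          = (a1 ++ [x]) ++ (a2 ++ a3) := by
        rw [ins_skip _ _ _ _ (fun y hy => by simp [hx, h1 y hy])]
        rw [ins_front _ _ _ (fun y hy => by
          rcases List.mem_append.mp hy with hy | hy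
          · simp [hx, h2 y hy]
          · simp [hx, h3 y hy])]
        simp
      simp only [List.foldl_cons, hstep]
      rw [ih (a1 ++ [x]) a2 a3 (fun y hy => by
            rcases List.mem_append.mp hy with hy | hy
            · exact h1 y hy
            · simp at hy; simp [hy, hx]) h2 h3]
      simp [hx]
    · have hstep : PySem.List.insertBy (fun a b => decide (pvPrio a < pvPrio b)) x (a1 ++ (a2 ++ a3))
          = a1 ++ ((a2 ++ [x]) ++ a3) := by
        rw [ins_skip _ _ _ _ (fun y hy => by simp [hx, h1 y hy])]
        rw [ins_skip _ _ _ _ (fun y hy => by simp [hx, h2 y hy])]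
        rw [ins_front _ _ _ (fun y hy => by simp [hx, h3 y hy])]
        simp
      simp only [List.foldl_cons, hstep]
      have h' := ih a1 (a2 ++ [x]) a3 h1 (fun y hy => by
            rcases List.mem_append.mp hy with hy | hy
            · exact h2 y hy
            · simp at hy; simp [hy, hx]) h3
      simp only [List.append_assoc] at h' ⊢
      rw [h']
      simp [hx]
    · have hstep : PySem.List.insertBy (fun a b => decide (pvPrio a < pvPrio b)) x (a1 ++ (a2 ++ a3))
          = a1 ++ (a2 ++ (a3 ++ [x])) := by
        rw [PySem.List.insertBy_of_forall_not_before _ _ _ (fun y hy => by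
          rcases List.mem_append.mp hy with hy | hy
          · simp [hx, h1 y hy]
          · rcases List.mem_append.mp hy with hy | hy
            · simp [hx, h2 y hy]
            · simp [hx, h3 y hy])]
        simp
      simp only [List.foldl_cons, hstep]
      rw [ih a1 a2 (a3 ++ [x]) h1 h2 (fun y hy => by
            rcases List.mem_append.mp hy with hy | hy
            · exact h3 y hy
            · simp at hy; simp [hy, hx])]
      simp [hx]

-- A's seen-set + append scan computes the values of B's first-wins (setdefault) dict
theorem dedup_values (ys : List (List (String × String))) :
    ∀ (d : PySem.Dict String (List (String × String))),
    (ys.foldl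
      (fun (st : List (List (String × String)) × PySem.Set String) action =>
        if PySem.Set.contains st.2 (pvKey action) then st
        else (st.1 ++ [action], PySem.Set.add st.2 (pvKey action)))
      (d.values, d.keys)).1
    = (ys.foldl (fun best action => best.setdefault (pvKey action) action) d).values := by
  induction ys with
  | nil => intro d; rfl
  | cons x t ih =>
    intro d
    simp only [List.foldl_cons]
    by_cases hm : d.contains (pvKey x) = true
    · have hset : PySem.Set.contains d.keys (pvKey x) = true := by
        rw [PySem.Dict.contains_eq_decide_mem_keys] at hm
        simpa [PySem.Set.contains_iff] using of_decide_eq_true hm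
      rw [if_pos hset, PySem.Dict.setdefault_of_contains d x hm]
      exact ih d
    · have hm' : d.contains (pvKey x) = false := by simpa using hm
      have hset : PySem.Set.contains d.keys (pvKey x) = false := by
        rw [PySem.Dict.contains_eq_decide_mem_keys] at hm'
        simp only [PySem.Set.contains_eq_listContains]
        simpa [List.contains_eq_mem] using hm'
      have hnotmem : pvKey x ∉ d.keys := by
        rw [PySem.Dict.contains_eq_decide_mem_keys] at hm'
        exact of_decide_eq_false hm'
      rw [if_neg (by simp [hnotmem]), PySem.Dict.setdefault_of_not_contains d x hm']
      have hvals : (d.insert (pvKey x) x).values = d.values ++ [x] := by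
        simp [PySem.Dict.values, PySem.Dict.items_insert_of_not_contains d x hm']
      have hkeys : (d.insert (pvKey x) x).keys = d.keys ++ [pvKey x] :=
        PySem.Dict.keys_insert_of_not_contains d x hm'
      have hadd : PySem.Set.add d.keys (pvKey x) = d.keys ++ [pvKey x] := by
        simp [PySem.Set.add, hnotmem]
      have h := ih (d.insert (pvKey x) x)
      rw [hvals, hkeys] at h
      rw [hadd]
      exact h

-- ===== VERDICT (by name: the statement is the Claim_ definition above) =====
theorem remove_duplicate_actions_py_spec : Claim_equal_remove_duplicate_actions_py := by
  intro all_actions _ _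
  unfold Spec_remove_duplicate_actions_py
  have hA := part all_actions [] [] [] (by simp) (by simp) (by simp)
  simp only [List.nil_append] at hA
  have hD := dedup_values
    (all_actions.filter (fun a => decide (pvPrio a = 1))
      ++ (all_actions.filter (fun a => decide (pvPrio a = 2))
      ++ all_actions.filter (fun a => decide (pvPrio a = 3))))
    PySem.Dict.empty
  simp only [remove_duplicate_actions_py, remove_duplicate_actions_py_alt,
    PySem.List.sorted_eq_foldl_insertBy, hA, List.append_assoc]
  simpa [PySem.Dict.values, PySem.Dict.keys, PySem.Dict.empty, PySem.Set.empty,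
    List.append_assoc] using hD
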